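-- pv_equiv track=rewrite | github.com/ianholmeslab/one-hot_encoder | one-hot_encoder.py | generate_cigar_transitions
-- ===== SOURCE A (Python) =====
-- def generate_cigar_transitions(cigar_tuples, reverse_flag):
--     """
--     Generates a list of transitions from a CIGAR tuple list.
--     Each transition tuple contains the previous and current CIGAR operations,
--     with 'start' and 'end' markers at the beginning and end of the list.
--
--     Input: list of cigar tuples from each bam alignment, flag boolean
--     Output: list of edges which depict the transition path of each CIGAR string
--     """
--     # Dictionary to map CIGAR operation codes to symbols
--     cigar_dict = {0: "M", 1: "I", 2: "D", 3: "N", 4: "S", 5: "H", 6: "P", 7: "=", 8: "X"}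
--
--     # Convert CIGAR tuples into a flat list of states
--     state_list = []
--     for enum, length in cigar_tuples:
--         state_char = cigar_dict[enum]
--         state_list.extend([state_char] * length)
--
--     # Initialize the transition list with the start marker
--     transitions = []
--     # Generate the transition list as tuples of (previous_state, current_state)
--     previous_state = state_list[0]
--
--     for current_state in state_list[1:]:
--         transitions.append((previous_state, current_state))
--         previous_state = current_state
--
--     #adding start and end edges
--     finished_transition_list = [('start', state_list[0])]
--     if reverse_flag:
--         finished_transition_list.extend(transitions[::-1])
--         finished_transition_list.append((previous_state, 'end'))
--         return finished_transition_list
--     else: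
--         finished_transition_list.extend(transitions)
--         finished_transition_list.append(((previous_state, 'end')))
--         return finished_transition_list
-- ===== SOURCE B (Python) =====
-- def generate_cigar_transitions(cigar_tuples, reverse_flag):
--     """Run-based re-implementation: works per (op, length) run instead of
--     expanding the CIGAR into a flat per-base state list."""
--     cigar_dict = {0: "M", 1: "I", 2: "D", 3: "N", 4: "S", 5: "H", 6: "P", 7: "=", 8: "X"}
--
--     # Collect nonzero-length runs (the dict lookup happens for every tuple).
--     runs = []
--     for enum, length in cigar_tuples:
--         char = cigar_dict[enum]
--         if length > 0:
--             runs.append((char, length))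
--
--     first_char = runs[0][0]
--
--     transitions = []
--     previous = None
--     for char, length in runs:
--         if previous is not None:
--             transitions.append((previous, char))
--         transitions.extend([(char, char)] * (length - 1))
--         previous = char
--
--     body = transitions[::-1] if reverse_flag else transitions
--     return [('start', first_char)] + body + [(previous, 'end')]
-- ===== Notes on version B (the rewrite author's own statement) =====
-- stated objective: alternative
-- what changed: B never builds the flat per-base state_list: it collects the nonzero-length runs (still doing the dict lookup for every tuple) and emits each run's transitions directly as a boundary edge plus (c,c) repeated length-1 times, so memory is O(runs + output) on the transition side instead of an extra O(total length) state list.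
import Mathlib
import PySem

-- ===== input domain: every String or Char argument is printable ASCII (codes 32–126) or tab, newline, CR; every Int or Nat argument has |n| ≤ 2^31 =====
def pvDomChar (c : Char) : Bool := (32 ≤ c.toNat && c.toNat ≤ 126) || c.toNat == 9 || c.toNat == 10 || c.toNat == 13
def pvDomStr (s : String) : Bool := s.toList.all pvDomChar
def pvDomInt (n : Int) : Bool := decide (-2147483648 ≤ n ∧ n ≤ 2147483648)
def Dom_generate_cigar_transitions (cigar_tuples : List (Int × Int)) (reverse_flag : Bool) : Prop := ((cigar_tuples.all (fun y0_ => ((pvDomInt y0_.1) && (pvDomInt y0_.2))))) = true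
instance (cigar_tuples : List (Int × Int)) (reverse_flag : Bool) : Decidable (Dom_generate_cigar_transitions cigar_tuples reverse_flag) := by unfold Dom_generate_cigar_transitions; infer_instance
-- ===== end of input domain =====

-- B re-implements the CIGAR transition expansion per run instead of via a flat per-base state list
-- (alternative decomposition, same asymptotic cost; return-value equivalence proved on Pre_).

-- the CIGAR code dictionary, shared literal of both programs
def pvCigarDict : PySem.Dict Int String :=
  PySem.Dict.ofList [(0, "M"), (1, "I"), (2, "D"), (3, "N"), (4, "S"), (5, "H"), (6, "P"), (7, "="), (8, "X")]

-- cigar_dict[enum]; raises KeyError outside keys 0..8 (excluded by Pre_), here defaulted to ""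
def cigarChar (e : Int) : String := (pvCigarDict.get? e).getD ""

-- ===== PORT A =====
def stepA (st : List (String × String) × String) (cur : String) : List (String × String) × String :=
  (st.1 ++ [(st.2, cur)], cur)

def generate_cigar_transitions (cigar_tuples : List (Int × Int)) (reverse_flag : Bool) : List (String × String) :=
  let state_list : List String :=
    cigar_tuples.foldl (fun acc p => acc ++ List.replicate p.2.toNat (cigarChar p.1)) []
  -- state_list[0] raises IndexError when state_list is empty (excluded by Pre_); here headD ""
  let previous0 := state_list.headD ""
  let r := (state_list.drop 1).foldl stepA ([], previous0)
  if reverse_flag then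
    ("start", previous0) :: r.1.reverse ++ [(r.2, "end")]
  else
    ("start", previous0) :: r.1 ++ [(r.2, "end")]

-- ===== PORT B =====
def stepB (st : List (String × String) × Option String) (q : String × Int) :
    List (String × String) × Option String :=
  ((match st.2 with
    | some p => st.1 ++ [(p, q.1)]
    | none => st.1) ++ List.replicate (q.2 - 1).toNat (q.1, q.1), some q.1)

def generate_cigar_transitions_alt (cigar_tuples : List (Int × Int)) (reverse_flag : Bool) : List (String × String) :=
  let runs : List (String × Int) :=
    cigar_tuples.foldl (fun acc p =>
      let c := cigarChar p.1
      if 0 < p.2 then acc ++ [(c, p.2)] else acc) []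
  -- runs[0][0] raises IndexError when runs is empty (excluded by Pre_); here headD
  let first := (runs.headD ("", 0)).1
  let r := runs.foldl stepB ([], none)
  let body := if reverse_flag then r.1.reverse else r.1
  ("start", first) :: body ++ [(r.2.getD "", "end")]

-- ===== PRECONDITION & SPEC =====
-- Pre_ excludes exactly the inputs on which A raises: a KeyError when some opcode is outside
-- 0..8, and an IndexError (state_list[0]) when no tuple has positive length.
def Pre_generate_cigar_transitions (cigar_tuples : List (Int × Int)) (reverse_flag : Bool) : Prop :=
  (∀ p ∈ cigar_tuples, 0 ≤ p.1 ∧ p.1 ≤ 8) ∧ (∃ p ∈ cigar_tuples, 0 < p.2)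
instance (cigar_tuples : List (Int × Int)) (reverse_flag : Bool) : Decidable (Pre_generate_cigar_transitions cigar_tuples reverse_flag) := by unfold Pre_generate_cigar_transitions; infer_instance

def pvWitness_generate_cigar_transitions : (List (Int × Int)) × Bool := ([(0, 2), (1, 1)], false)

def Spec_generate_cigar_transitions (cigar_tuples : List (Int × Int)) (reverse_flag : Bool) (out : List (String × String)) : Prop := out = generate_cigar_transitions_alt cigar_tuples reverse_flag
instance (cigar_tuples : List (Int × Int)) (reverse_flag : Bool) (out : List (String × String)) : Decidable (Spec_generate_cigar_transitions cigar_tuples reverse_flag out) := by unfold Spec_generate_cigar_transitions; infer_instance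

-- ===== CLAIM (what is proved, stated in full; the proofs are below) =====
def Claim_equal_generate_cigar_transitions : Prop := ∀ (cigar_tuples : List (Int × Int)) (reverse_flag : Bool), Dom_generate_cigar_transitions cigar_tuples reverse_flag → Pre_generate_cigar_transitions cigar_tuples reverse_flag → Spec_generate_cigar_transitions cigar_tuples reverse_flag (generate_cigar_transitions cigar_tuples reverse_flag)

-- ===== LEMMAS AND PROOFS =====

/-- Consecutive pairs of a list of states. -/
def chainPairs : List String → List (String × String)
  | [] => []
  | [_] => []
  | a :: b :: t => (a, b) :: chainPairs (b :: t)

def stateOf (ct : List (Int × Int)) : List String :=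
  ct.flatMap fun p => List.replicate p.2.toNat (cigarChar p.1)

def runsOf (ct : List (Int × Int)) : List (String × Int) :=
  ct.filterMap fun p => if 0 < p.2 then some (cigarChar p.1, p.2) else none

def flatRuns (runs : List (String × Int)) : List String :=
  runs.flatMap fun q => List.replicate q.2.toNat q.1

theorem state_foldl (ct : List (Int × Int)) (acc : List String) :
    ct.foldl (fun acc p => acc ++ List.replicate p.2.toNat (cigarChar p.1)) acc = acc ++ stateOf ct := by
  induction ct generalizing acc with
  | nil => simp [stateOf]
  | cons p t ih => simp [stateOf, List.foldl, ih]

theorem runs_foldl (ct : List (Int × Int)) (acc : List (String × Int)) :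
    ct.foldl (fun acc p => let c := cigarChar p.1; if 0 < p.2 then acc ++ [(c, p.2)] else acc) acc
      = acc ++ runsOf ct := by
  induction ct generalizing acc with
  | nil => simp [runsOf]
  | cons p t ih =>
    simp only [List.foldl, runsOf, List.filterMap_cons]
    by_cases h : 0 < p.2 <;> simp [h, ih, runsOf]

theorem flat_runsOf (ct : List (Int × Int)) : flatRuns (runsOf ct) = stateOf ct := by
  induction ct with
  | nil => rfl
  | cons p t ih =>
    simp only [runsOf, stateOf, List.filterMap_cons, List.flatMap_cons]
    by_cases h : 0 < p.2
    · simpa [h, flatRuns, runsOf, stateOf] using ih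
    · have : p.2.toNat = 0 := by omega
      simpa [h, this, flatRuns, runsOf, stateOf] using ih

theorem runs_pos (ct : List (Int × Int)) : ∀ q ∈ runsOf ct, 0 < q.2 := by
  intro q hq
  simp only [runsOf, List.mem_filterMap] at hq
  obtain ⟨p, _, hp⟩ := hq
  split at hp
  · cases hp; assumption
  · cases hp


theorem chainPairs_cons_cons (a b : String) (t : List String) :
    chainPairs (a :: b :: t) = (a, b) :: chainPairs (b :: t) := rfl

theorem getLastD_shift (a d : String) (t : List String) :
    t.getLast?.getD a = (a :: t).getLast?.getD d := by
  cases t with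
  | nil => simp
  | cons b u => simp [List.getLast?_cons]

theorem foldA (s : List String) (prev : String) (acc : List (String × String)) :
    s.foldl stepA (acc, prev) = (acc ++ chainPairs (prev :: s), s.getLastD prev) := by
  induction s generalizing prev acc with
  | nil => simp [chainPairs]
  | cons a t ih =>
    simp only [List.foldl, stepA]
    rw [ih, chainPairs_cons_cons]
    simp [← getLastD_shift a prev t]

theorem chainPairs_run0 (m : ℕ) (c : String) (ys : List String) :
    chainPairs (List.replicate (m + 1) c ++ ys)
      = List.replicate m (c, c) ++ chainPairs (c :: ys) := by
  induction m with
  | zero => simp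
  | succ k ih =>
    have h1 : List.replicate (k + 1 + 1) c ++ ys = c :: (List.replicate (k + 1) c ++ ys) := by
      simp [List.replicate_succ]
    have h2 : List.replicate (k + 1) c ++ ys = c :: (List.replicate k c ++ ys) := by
      simp [List.replicate_succ]
    rw [h1, h2, chainPairs_cons_cons, ← h2, ih]
    simp [List.replicate_succ]

theorem chainPairs_run (m : ℕ) (prev c : String) (ys : List String) :
    chainPairs (prev :: (List.replicate (m + 1) c ++ ys))
      = (prev, c) :: (List.replicate m (c, c) ++ chainPairs (c :: ys)) := by
  have h2 : List.replicate (m + 1) c ++ ys = c :: (List.replicate m c ++ ys) := by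
    simp [List.replicate_succ]
  rw [h2, chainPairs_cons_cons, ← h2, chainPairs_run0]

theorem getLastD_rep (m : ℕ) (c : String) (ys : List String) (d : String) :
    (List.replicate (m + 1) c ++ ys).getLastD d = ys.getLastD c := by
  induction m generalizing d with
  | zero =>
    simp only [List.replicate_succ, List.replicate_zero, List.cons_append, List.nil_append]
    rw [List.getLastD_eq_getLast?, List.getLastD_eq_getLast?]
    exact (getLastD_shift c d ys).symm
  | succ k ih =>
    have h1 : List.replicate (k + 1 + 1) c ++ ys = c :: (List.replicate (k + 1) c ++ ys) := by
      simp [List.replicate_succ]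
    rw [h1, List.getLastD_cons, ih]

theorem foldB (runs : List (String × Int)) (h : ∀ q ∈ runs, 0 < q.2)
    (prev : String) (acc : List (String × String)) :
    runs.foldl stepB (acc, some prev)
      = (acc ++ chainPairs (prev :: flatRuns runs), some ((flatRuns runs).getLastD prev)) := by
  induction runs generalizing prev acc with
  | nil => simp [flatRuns, chainPairs]
  | cons q rs ih =>
    have hq : 0 < q.2 := h q (by simp)
    have hm : q.2.toNat = (q.2 - 1).toNat + 1 := by omega
    simp only [List.foldl, stepB]
    rw [ih (fun r hr => h r (by simp [hr])) q.1]
    simp only [flatRuns, List.flatMap_cons, hm]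
    rw [chainPairs_run ((q.2 - 1).toNat) prev q.1, getLastD_rep]
    simp

-- ===== VERDICT (by name: the statement is the Claim_ definition above) =====

theorem generate_cigar_transitions_spec : Claim_equal_generate_cigar_transitions := by
  intro ct rf _ hpre
  obtain ⟨_, p0, hp0mem, hp0⟩ := hpre
  have hmem : (cigarChar p0.1, p0.2) ∈ runsOf ct := by
    simp only [runsOf, List.mem_filterMap]
    exact ⟨p0, hp0mem, by simp [hp0]⟩
  obtain ⟨⟨c, n⟩, rs, hruns⟩ : ∃ q rs, runsOf ct = q :: rs := by
    cases hr : runsOf ct with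
    | nil => rw [hr] at hmem; simp at hmem
    | cons q rs => exact ⟨q, rs, rfl⟩
  have hpos := runs_pos ct
  rw [hruns] at hpos
  have hn : 0 < n := hpos (c, n) (by simp)
  have hm : n.toNat = (n - 1).toNat + 1 := by omega
  set m := (n - 1).toNat with hmdef
  have hstate : stateOf ct = List.replicate (m + 1) c ++ flatRuns rs := by
    rw [← flat_runsOf, hruns]
    simp only [flatRuns, List.flatMap_cons, hm]
  unfold Spec_generate_cigar_transitions generate_cigar_transitions generate_cigar_transitions_alt
  simp only [state_foldl, runs_foldl, List.nil_append, hruns, hstate]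
  rw [List.foldl_cons]
  have hstep1 : stepB ([], none) (c, n) = (List.replicate m (c, c), some c) := by
    simp [stepB, hmdef]
  rw [hstep1, foldB rs (fun r hr => hpos r (by simp [hr])) c]
  simp only [List.replicate_succ, List.cons_append, List.headD_cons, List.drop_one, List.tail_cons]
  rw [foldA]
  have e1 : chainPairs (c :: (List.replicate m c ++ flatRuns rs))
      = List.replicate m (c, c) ++ chainPairs (c :: flatRuns rs) := by
    cases m with
    | zero => simp
    | succ k => rw [chainPairs_run k c c]; simp [List.replicate_succ]
  have e2 : (List.replicate m c ++ flatRuns rs).getLastD c = (flatRuns rs).getLastD c := by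
    cases m with
    | zero => simp
    | succ k => rw [getLastD_rep]
  rw [e1, e2]
  cases rf <;> simp
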